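-- pv_equiv track=rewrite | github.com/OakenKnight/oisisi_projekat_python | lista.py | comp_op
-- ===== SOURCE A (Python) =====
-- def comp_op(lista1, lista2):      #svi elementi prve liste koji se ne poklapaju ni sa jednim lementom druge liste
--     ret_lista = lista1.copy()
--     for elem1 in lista1:
--         for elem2 in lista2:
--             if elem1 == elem2:
--                 if ret_lista.__contains__(elem1):
--                     ret_lista.remove(elem1)
--     ret_lista = list(dict.fromkeys(ret_lista))
--     return ret_lista
-- ===== SOURCE B (Python) =====
-- def comp_op(lista1, lista2):
--     d = dict.fromkeys(lista1)
--     for elem in lista2: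
--         d.pop(elem, None)
--     return list(d)
-- ===== Notes on version B (the rewrite author's own statement) =====
-- stated objective: faster
-- what changed: Instead of repeatedly calling list.remove inside a nested loop over both lists and deduplicating afterwards, B builds an insertion-ordered dict from lista1 once (deduplicating up front) and deletes lista2's values from it in a single pass.
import Mathlib
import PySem

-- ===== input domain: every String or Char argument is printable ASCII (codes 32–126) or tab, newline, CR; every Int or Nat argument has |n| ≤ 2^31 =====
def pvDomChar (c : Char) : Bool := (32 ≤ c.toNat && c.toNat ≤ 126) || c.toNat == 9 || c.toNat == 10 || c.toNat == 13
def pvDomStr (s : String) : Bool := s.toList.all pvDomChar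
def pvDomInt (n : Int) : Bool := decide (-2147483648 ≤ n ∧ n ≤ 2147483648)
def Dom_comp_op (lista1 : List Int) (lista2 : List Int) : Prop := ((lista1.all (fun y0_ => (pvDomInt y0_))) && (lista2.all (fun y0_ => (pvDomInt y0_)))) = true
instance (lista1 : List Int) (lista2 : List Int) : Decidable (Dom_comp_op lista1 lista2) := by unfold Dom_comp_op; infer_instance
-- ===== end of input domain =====

-- B replaces A's nested list.remove loops + final dedup by one ordered dict built from lista1
-- and a single deleting pass over lista2 (objective: faster).

-- ===== PORT A =====
-- ret_lista = lista1.copy(); nested for-loops; guarded list.remove; final list(dict.fromkeys(...))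
def comp_op (lista1 : List Int) (lista2 : List Int) : List Int :=
  let ret_lista := lista1
  let ret_lista := lista1.foldl (fun ret e1 =>
    lista2.foldl (fun ret e2 =>
      if e1 == e2 then
        if ret.contains e1 then (PySem.List.remove? ret e1).getD ret else ret
      else ret) ret) ret_lista
  PySem.List.dedup ret_lista

-- ===== PORT B =====
-- d = dict.fromkeys(lista1); for elem in lista2: d.pop(elem, None); return list(d)
def comp_op_alt (lista1 : List Int) (lista2 : List Int) : List Int :=
  let d : PySem.Dict Int (Option Unit) :=
    lista1.foldl (fun d x => d.insert x none) PySem.Dict.empty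
  let d := lista2.foldl (fun d elem => d.erase elem) d
  d.keys

-- ===== PRECONDITION & SPEC =====
def Spec_comp_op (lista1 : List Int) (lista2 : List Int) (out : List Int) : Prop := out = comp_op_alt lista1 lista2
instance (lista1 : List Int) (lista2 : List Int) (out : List Int) : Decidable (Spec_comp_op lista1 lista2 out) := by unfold Spec_comp_op; infer_instance

-- ===== CLAIM (what is proved, stated in full; the proofs are below) =====
def Claim_equal_comp_op : Prop := ∀ (lista1 : List Int) (lista2 : List Int), Dom_comp_op lista1 lista2 → Spec_comp_op lista1 lista2 (comp_op lista1 lista2)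

-- ===== LEMMAS AND PROOFS =====

-- A's inner loop over lista2, for a fixed elem1 = v, erases the first occurrence of v
-- once per occurrence of v in lista2.
theorem inner_eq_iterate (v : Int) (l2 : List Int) (s : List Int) :
    l2.foldl (fun ret e2 =>
      if v == e2 then
        if ret.contains v then (PySem.List.remove? ret v).getD ret else ret
      else ret) s = (fun t => t.erase v)^[l2.count v] s := by
  induction l2 generalizing s with
  | nil => rfl
  | cons e l2 ih =>
    by_cases he : v = e
    · subst he
      have hstep : (if s.contains v then (PySem.List.remove? s v).getD s else s) = s.erase v := by
        by_cases hm : v ∈ s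
        · simp [hm, PySem.List.remove?_eq_some_erase s v hm]
        · simp [hm, List.erase_of_not_mem hm]
      simp only [List.foldl_cons, BEq.rfl, if_true, hstep, ih, List.count_cons_self,
        Function.iterate_succ_apply]
    · have hb : (v == e) = false := by simpa using he
      rw [List.foldl_cons]
      simp only [hb, Bool.false_eq_true, if_false]
      rw [ih, List.count_cons_of_ne (Ne.symm he)]

theorem count_iterate_erase_self (v : Int) (n : Nat) (s : List Int) :
    ((fun t => t.erase v)^[n] s).count v = s.count v - n := by
  induction n generalizing s with
  | zero => simp
  | succ n ih =>
    rw [Function.iterate_succ_apply, ih, List.count_erase_self]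
    omega

theorem count_iterate_erase_ne (v w : Int) (hne : w ≠ v) (n : Nat) (s : List Int) :
    ((fun t => t.erase v)^[n] s).count w = s.count w := by
  induction n generalizing s with
  | zero => simp
  | succ n ih => rw [Function.iterate_succ_apply, ih, List.count_erase_of_ne hne]

theorem iterate_erase_sublist (v : Int) (n : Nat) (s : List Int) :
    List.Sublist ((fun t => t.erase v)^[n] s) s := by
  induction n generalizing s with
  | zero => simp
  | succ n ih =>
    rw [Function.iterate_succ_apply]
    exact (ih (s.erase v)).trans (List.erase_sublist)

-- the outer loop of A, with the inner loop already summarised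
def aStep (l2 : List Int) (s : List Int) (v : Int) : List Int := (fun t => t.erase v)^[l2.count v] s

theorem loop_sublist (l2 rem s : List Int) : List.Sublist (rem.foldl (aStep l2) s) s := by
  induction rem generalizing s with
  | nil => simp
  | cons w rem ih =>
    exact (ih (aStep l2 s w)).trans (iterate_erase_sublist w (l2.count w) s)

theorem loop_count_notin (l2 : List Int) (v : Int) (hv : v ∉ l2) (rem s : List Int) :
    (rem.foldl (aStep l2) s).count v = s.count v := by
  induction rem generalizing s with
  | nil => rfl
  | cons w rem ih =>
    rw [List.foldl_cons, ih]
    by_cases hw : v = w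
    · subst hw
      have : l2.count v = 0 := List.count_eq_zero.mpr hv
      simp [aStep, this]
    · exact count_iterate_erase_ne w v hw _ s

theorem loop_count_in (l2 : List Int) (v : Int) (hv : v ∈ l2) (rem : List Int) :
    ∀ s : List Int, s.count v ≤ rem.count v → (rem.foldl (aStep l2) s).count v = 0 := by
  induction rem with
  | nil => intro s h; simpa using Nat.le_zero.mp (by simpa using h)
  | cons w rem ih =>
    intro s h
    rw [List.foldl_cons]
    apply ih
    simp only [aStep]
    by_cases hw : w = v
    · subst hw
      rw [List.count_cons_self] at h
      have h2 : 1 ≤ l2.count w := List.count_pos_iff.mpr hv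
      rw [count_iterate_erase_self]
      omega
    · have hvw : v ≠ w := fun h' => hw h'.symm
      rw [count_iterate_erase_ne w v hvw]
      rwa [List.count_cons_of_ne (Ne.symm hvw)] at h

-- a sublist that drops every element failing p and keeps every occurrence of elements
-- satisfying p is exactly the filter
theorem sublist_eq_filter (p : Int → Bool) :
    ∀ {s l : List Int}, List.Sublist s l → (∀ v, p v = false → s.count v = 0) →
      (∀ v, p v = true → s.count v = l.count v) → s = l.filter p := by
  intro s l h
  induction h with
  | slnil => intro _ _; rfl
  | @cons s l a h ih =>
    intro h0 h1
    have hpa : p a = false := by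
      by_contra hpa
      have hpa' : p a = true := by simpa using hpa
      have := h1 a hpa'
      have hle := h.count_le a
      rw [List.count_cons_self] at this
      omega
    rw [List.filter_cons_of_neg (by simp [hpa])]
    exact ih h0 (fun v hv => by
      rcases eq_or_ne v a with rfl | hne
      · exact absurd hv (by simp [hpa])
      · have := h1 v hv
        rwa [List.count_cons_of_ne (Ne.symm hne)] at this)
  | @cons₂ s l a h ih =>
    intro h0 h1
    have hpa : p a = true := by
      by_contra hpa
      have hpa' : p a = false := by simpa using hpa
      have := h0 a hpa'
      rw [List.count_cons_self] at this
      omega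
    rw [List.filter_cons_of_pos (by simp [hpa])]
    congr 1
    apply ih
    · intro v hv
      have := h0 v hv
      rcases eq_or_ne v a with rfl | hne
      · rw [hpa] at hv; cases hv
      · rwa [List.count_cons_of_ne (Ne.symm hne)] at this
    · intro v hv
      have := h1 v hv
      rcases eq_or_ne v a with rfl | hne
      · rw [List.count_cons_self, List.count_cons_self] at this; omega
      · rwa [List.count_cons_of_ne (Ne.symm hne), List.count_cons_of_ne (Ne.symm hne)] at this

theorem loopA_eq_filter (l1 l2 : List Int) :
    l1.foldl (aStep l2) l1 = l1.filter (fun x => !l2.contains x) := by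
  apply sublist_eq_filter
  · exact loop_sublist l2 l1 l1
  · intro v hv
    have hv' : v ∈ l2 := by simpa using hv
    exact loop_count_in l2 v hv' l1 l1 le_rfl
  · intro v hv
    have hv' : v ∉ l2 := by simpa using hv
    exact loop_count_notin l2 v hv' l1 l1

-- dedup (ordered, first occurrences) commutes with filter
theorem foldl_add_filter (p : Int → Bool) (l : List Int) :
    ∀ s : List Int, (l.filter p).foldl PySem.Set.add (s.filter p) =
      (l.foldl PySem.Set.add s).filter p := by
  induction l with
  | nil => intro s; rfl
  | cons x l ih =>
    intro s
    have hadd : PySem.Set.add s x = if x ∈ s then s else s ++ [x] := by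
      simp [PySem.Set.add, PySem.Set.contains]
    by_cases hx : p x = true
    · rw [List.filter_cons_of_pos hx, List.foldl_cons, List.foldl_cons]
      have key : PySem.Set.add (s.filter p) x = (PySem.Set.add s x).filter p := by
        rw [hadd]
        by_cases hm : x ∈ s
        · have hmf : x ∈ s.filter p := List.mem_filter.mpr ⟨hm, hx⟩
          simp [PySem.Set.add, PySem.Set.contains, hm, hmf]
        · have hmf : x ∉ s.filter p := fun h => hm (List.mem_filter.mp h).1
          simp [PySem.Set.add, PySem.Set.contains, hm, hmf,
            List.filter_append, hx]
      rw [key]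
      exact ih _
    · have hx' : p x = false := by simpa using hx
      rw [List.filter_cons_of_neg (by simp [hx']), List.foldl_cons]
      have key : ((PySem.Set.add s x : List Int)).filter p = s.filter p := by
        rw [hadd]
        by_cases hm : x ∈ s
        · simp [hm]
        · simp [hm, List.filter_append, hx']
      rw [← key]
      exact ih _

theorem dedup_filter (p : Int → Bool) (l : List Int) :
    PySem.List.dedup (l.filter p) = (PySem.List.dedup l).filter p := by
  have := foldl_add_filter p l []
  simpa [PySem.List.dedup, PySem.Set.ofList, PySem.Set.empty] using this

-- B's deleting pass over lista2 filters the dict's items by key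
theorem erase_foldl_eq_filter (l2 : List Int) :
    ∀ d : PySem.Dict Int (Option Unit),
      l2.foldl (fun d elem => d.erase elem) d =
        PySem.Dict.mk (d.items.filter (fun pr => !l2.contains pr.1)) := by
  induction l2 with
  | nil => intro d; simp
  | cons e l2 ih =>
    intro d
    rw [List.foldl_cons, ih]
    have : (PySem.Dict.erase d e).items = d.items.filter (fun pr => !pr.1 == e) := rfl
    rw [this, List.filter_filter]
    congr 1
    apply List.filter_congr
    intro pr _
    by_cases h1 : pr.1 = e <;> simp [h1]

theorem keys_fromkeys (l1 : List Int) :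
    (l1.foldl (fun d x => PySem.Dict.insert d x (none : Option Unit)) PySem.Dict.empty).keys
      = PySem.List.dedup l1 := by
  rw [PySem.Dict.keys_foldl_insert]
  simp [PySem.Set.update, PySem.List.dedup, PySem.Set.ofList, PySem.Dict.keys_empty,
    PySem.Set.empty]

theorem comp_op_alt_eq_filter_dedup (l1 l2 : List Int) :
    comp_op_alt l1 l2 = (PySem.List.dedup l1).filter (fun x => !l2.contains x) := by
  show (l2.foldl (fun d elem => PySem.Dict.erase d elem)
      (l1.foldl (fun d x => PySem.Dict.insert d x (none : Option Unit)) PySem.Dict.empty)).keys = _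
  rw [erase_foldl_eq_filter]
  show (List.filter _ _).map Prod.fst = _
  rw [show (fun pr : Int × Option Unit => !l2.contains pr.1)
        = (fun k => !l2.contains k) ∘ Prod.fst from rfl]
  rw [← List.filter_map]
  rw [show (List.map Prod.fst
        ((l1.foldl (fun d x => PySem.Dict.insert d x (none : Option Unit)) PySem.Dict.empty).items))
      = (l1.foldl (fun d x => PySem.Dict.insert d x (none : Option Unit)) PySem.Dict.empty).keys from rfl]
  rw [keys_fromkeys]

-- ===== VERDICT (by name: the statement is the Claim_ definition above) =====
theorem comp_op_spec : Claim_equal_comp_op := by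
  intro l1 l2 _
  unfold Spec_comp_op comp_op
  simp only [inner_eq_iterate]
  rw [show (fun ret e1 => (fun t => t.erase e1)^[l2.count e1] ret) = aStep l2 from rfl]
  rw [loopA_eq_filter, dedup_filter, comp_op_alt_eq_filter_dedup]
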